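-- pv_equiv track=rewrite | github.com/izachstanford/smart-books-ai | book-processing/impute_genres.py | get_primary_genre
-- ===== SOURCE A (Python) =====
-- def get_primary_genre(genres, is_nonfiction=None):
--     """Determine the primary genre from a list"""
--     if not genres:
--         return 'Unknown'
--
--     # Priority order for nonfiction
--     nonfiction_priority = ['Business', 'Self-Help', 'Psychology', 'Philosophy',
--                           'Biography', 'History', 'Science', 'Technology',
--                           'Finance', 'Religion', 'Health', 'Parenting']
--
--     # Priority order for fiction
--     fiction_priority = ['Fantasy', 'Science Fiction', 'Mystery', 'Thriller',
--                        'Romance', 'Horror', 'Classics', 'Young Adult']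
--
--     if is_nonfiction:
--         for g in nonfiction_priority:
--             if g in genres or any(g.lower() in genre.lower() for genre in genres):
--                 return g
--         return 'Nonfiction'
--     elif is_nonfiction is False:
--         for g in fiction_priority:
--             if g in genres or any(g.lower() in genre.lower() for genre in genres):
--                 return g
--         return 'Fiction'
--     else:
--         # Unknown - just return first genre
--         return genres[0] if genres else 'Unknown'
-- ===== SOURCE B (Python) =====
-- NONFICTION_PRIORITY = ['Business', 'Self-Help', 'Psychology', 'Philosophy',
--                        'Biography', 'History', 'Science', 'Technology',
--                        'Finance', 'Religion', 'Health', 'Parenting']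
-- FICTION_PRIORITY = ['Fantasy', 'Science Fiction', 'Mystery', 'Thriller',
--                     'Romance', 'Horror', 'Classics', 'Young Adult']
--
--
-- def get_primary_genre(genres, is_nonfiction=None):
--     """Determine the primary genre from a list"""
--     if not genres:
--         return 'Unknown'
--     if is_nonfiction is None:
--         return genres[0]
--     priority = NONFICTION_PRIORITY if is_nonfiction else FICTION_PRIORITY
--     best = len(priority)
--     for genre in genres:
--         gl = genre.lower()
--         for i, w in enumerate(priority):
--             if w.lower() in gl:
--                 best = min(best, i)
--     if best < len(priority):
--         return priority[best]
--     return 'Nonfiction' if is_nonfiction else 'Fiction'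
-- ===== Notes on version B (the rewrite author's own statement) =====
-- stated objective: alternative
-- what changed: B loops over the genres as the outer structure and tracks the minimum matched priority rank, instead of A's priority-first scan with early return; the redundant exact-membership clause is dropped since it is subsumed by the case-insensitive substring test.
import Mathlib
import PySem

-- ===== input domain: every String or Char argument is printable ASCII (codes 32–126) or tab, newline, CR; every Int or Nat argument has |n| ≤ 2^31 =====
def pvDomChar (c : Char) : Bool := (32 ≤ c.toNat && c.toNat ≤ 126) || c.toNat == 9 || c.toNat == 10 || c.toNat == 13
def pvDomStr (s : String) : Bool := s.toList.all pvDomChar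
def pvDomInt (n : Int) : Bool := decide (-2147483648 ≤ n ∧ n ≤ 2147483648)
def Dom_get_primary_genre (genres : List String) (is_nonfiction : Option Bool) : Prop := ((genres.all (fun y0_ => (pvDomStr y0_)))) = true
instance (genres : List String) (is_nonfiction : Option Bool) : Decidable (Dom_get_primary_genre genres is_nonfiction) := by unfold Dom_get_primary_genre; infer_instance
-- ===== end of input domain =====

-- B replaces A's priority-first scan with early return by a genres-outer pass tracking the
-- minimum matched priority rank (alternative decomposition, same cost; return values identical).

-- g.lower() in genre.lower()  (shared by both ports: both Pythons write this very test)
def lowIn (w genre : String) : Bool := PySem.Str.isIn (PySem.Str.lower w) (PySem.Str.lower genre)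

def nonfiction_priority : List String :=
  ["Business", "Self-Help", "Psychology", "Philosophy", "Biography", "History",
   "Science", "Technology", "Finance", "Religion", "Health", "Parenting"]

def fiction_priority : List String :=
  ["Fantasy", "Science Fiction", "Mystery", "Thriller", "Romance", "Horror",
   "Classics", "Young Adult"]

-- ===== PORT A =====
-- A's 'for g in priority: if g in genres or any(...): return g' with its fall-through default
def loopA (genres : List String) (ps : List String) (dflt : String) : String :=
  match ps with
  | [] => dflt
  | g :: rest =>
    if decide (g ∈ genres) || genres.any (fun genre => lowIn g genre) then g
    else loopA genres rest dflt

def get_primary_genre (genres : List String) (is_nonfiction : Option Bool) : String :=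
  if genres.isEmpty then "Unknown"
  else
    match is_nonfiction with
    | some true => loopA genres nonfiction_priority "Nonfiction"
    | some false => loopA genres fiction_priority "Fiction"
    | none => if !genres.isEmpty then genres.headD "" else "Unknown"

-- ===== PORT B =====
-- inner 'for i, w in enumerate(priority): if w.lower() in gl: best = min(best, i)'
def scanGenre (genre : String) : List String → Nat → Nat → Nat
  | [], _, best => best
  | w :: rest, i, best =>
    scanGenre genre rest (i + 1) (if lowIn w genre then min best i else best)

def get_primary_genre_alt (genres : List String) (is_nonfiction : Option Bool) : String :=
  match genres with
  | [] => "Unknown"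
  | g0 :: _ =>
    match is_nonfiction with
    | none => g0
    | some b =>
      let ps := if b then nonfiction_priority else fiction_priority
      let best := genres.foldl (fun best genre => scanGenre genre ps 0 best) ps.length
      if best < ps.length then ps.getD best ""
      else if b then "Nonfiction" else "Fiction"

-- ===== PRECONDITION & SPEC =====
def Spec_get_primary_genre (genres : List String) (is_nonfiction : Option Bool) (out : String) : Prop := out = get_primary_genre_alt genres is_nonfiction
instance (genres : List String) (is_nonfiction : Option Bool) (out : String) : Decidable (Spec_get_primary_genre genres is_nonfiction out) := by unfold Spec_get_primary_genre; infer_instance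

-- ===== CLAIM (what is proved, stated in full; the proofs are below) =====
def Claim_equal_get_primary_genre : Prop := ∀ (genres : List String) (is_nonfiction : Option Bool), Dom_get_primary_genre genres is_nonfiction → Spec_get_primary_genre genres is_nonfiction (get_primary_genre genres is_nonfiction)

-- ===== LEMMAS AND PROOFS =====

-- lower w is a substring of itself, so A's 'g in genres' clause is subsumed
theorem lowIn_refl (w : String) : lowIn w w = true := by
  simp [lowIn, PySem.Str.isIn_eq, PySem.Chars.isIn_iff_infix]

theorem predEq (genres : List String) (g : String) :
    (decide (g ∈ genres) || genres.any (fun genre => lowIn g genre))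
      = genres.any (fun genre => lowIn g genre) := by
  by_cases h : g ∈ genres
  · simp [h]
    exact ⟨g, h, lowIn_refl g⟩
  · simp [h]

-- A's loop returns the first priority word matched by some genre
theorem loopA_eq (genres : List String) (dflt : String) :
    ∀ ps : List String,
      loopA genres ps dflt =
        (let K := ps.findIdx (fun w => genres.any (fun genre => lowIn w genre))
         if K < ps.length then ps.getD K "" else dflt) := by
  intro ps
  induction ps with
  | nil => simp [loopA]
  | cons g rest ih =>
    simp only [loopA, predEq genres g, List.findIdx_cons]
    cases h : genres.any (fun genre => lowIn g genre) with
    | true => simp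
    | false =>
      simp only [cond_false, if_neg (Bool.false_ne_true)]
      rw [ih]
      simp only [List.length_cons]
      by_cases hK : rest.findIdx (fun w => genres.any (fun genre => lowIn w genre)) < rest.length
      · simp [hK, Nat.succ_lt_succ hK, List.getD]
      · simp [hK]

-- B's inner scan computes min of the accumulator and the first (=least) index matching this genre
theorem scanGenre_eq (genre : String) :
    ∀ (ps : List String) (i best : Nat),
      scanGenre genre ps i best =
        if ps.any (fun w => lowIn w genre) then
          min best (i + ps.findIdx (fun w => lowIn w genre))
        else best := by
  intro ps
  induction ps with
  | nil => simp [scanGenre]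
  | cons w rest ih =>
    intro i best
    simp only [scanGenre, List.any_cons, List.findIdx_cons]
    cases h : lowIn w genre with
    | true =>
      simp only [Bool.true_or, cond_true, if_true, ih]
      split <;> omega
    | false =>
      simp only [Bool.false_or, cond_false, ih, if_neg (Bool.false_ne_true)]
      by_cases ha : (rest.any (fun w => lowIn w genre)) = true
      · simp only [ha, if_true]
        omega
      · simp [ha]

-- the fold over genres only ever decreases the accumulator
theorem fold_le (ps : List String) :
    ∀ (genres : List String) (best : Nat),
      genres.foldl (fun best genre => scanGenre genre ps 0 best) best ≤ best := by
  intro genres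
  induction genres with
  | nil => simp
  | cons g rest ih =>
    intro best
    simp only [List.foldl_cons]
    refine le_trans (ih _) ?_
    rw [scanGenre_eq]
    split
    · omega
    · exact le_refl _

-- the result of the fold is the initial value or the first-match index of some genre that matches
theorem fold_cases (ps : List String) :
    ∀ (genres : List String) (best : Nat),
      genres.foldl (fun best genre => scanGenre genre ps 0 best) best = best ∨
        ∃ g ∈ genres, (ps.any (fun w => lowIn w g)) = true ∧
          genres.foldl (fun best genre => scanGenre genre ps 0 best) best
            = ps.findIdx (fun w => lowIn w g) := by
  intro genres
  induction genres with
  | nil => intro best; left; rfl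
  | cons g rest ih =>
    intro best
    simp only [List.foldl_cons]
    rw [scanGenre_eq]
    by_cases h : (ps.any (fun w => lowIn w g)) = true
    · simp only [h, if_true, Nat.zero_add]
      rcases ih (min best (ps.findIdx (fun w => lowIn w g))) with h1 | ⟨g', hg', hany, heq⟩
      · rcases Nat.le_total best (ps.findIdx (fun w => lowIn w g)) with hle | hle
        · left; rw [h1]; omega
        · right; exact ⟨g, List.mem_cons_self .., h, by rw [h1]; omega⟩
      · right; exact ⟨g', List.mem_cons_of_mem _ hg', hany, heq⟩
    · simp only [h]
      rcases ih best with h1 | ⟨g', hg', hany, heq⟩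
      · left; exact h1
      · right; exact ⟨g', List.mem_cons_of_mem _ hg', hany, heq⟩

-- the fold descends to each matching genre's first-match index
theorem fold_le_f (ps : List String) :
    ∀ (genres : List String) (best : Nat) (g : String), g ∈ genres →
      (ps.any (fun w => lowIn w g)) = true →
      genres.foldl (fun best genre => scanGenre genre ps 0 best) best
        ≤ ps.findIdx (fun w => lowIn w g) := by
  intro genres
  induction genres with
  | nil => intro best g hg; exact absurd hg (List.not_mem_nil)
  | cons g0 rest ih =>
    intro best g hg hany
    simp only [List.foldl_cons]
    rcases List.mem_cons.mp hg with rfl | hg'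
    · refine le_trans (fold_le ps rest _) ?_
      rw [scanGenre_eq]
      simp [hany]
    · exact ih _ g hg' hany

-- minimality of findIdx: a satisfied index bounds it
theorem findIdx_le_of_getElem {α : Type} (p : α → Bool) (l : List α) (i : Nat)
    (hi : i < l.length) (hp : p l[i] = true) : l.findIdx p ≤ i := by
  by_contra hlt
  have h2 : p l[i] = false := List.not_of_lt_findIdx (Nat.lt_of_not_le hlt)
  exact Bool.false_ne_true (h2.symm.trans hp)

-- B's fold equals A's first-match index over the combined predicate
theorem fold_eq_findIdx (ps genres : List String) :
    genres.foldl (fun best genre => scanGenre genre ps 0 best) ps.length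
      = ps.findIdx (fun w => genres.any (fun genre => lowIn w genre)) := by
  set R := genres.foldl (fun best genre => scanGenre genre ps 0 best) ps.length with hR
  set K := ps.findIdx (fun w => genres.any (fun genre => lowIn w genre)) with hK
  have hKR : K ≤ R := by
    rcases fold_cases ps genres ps.length with h1 | ⟨g, hg, hany, heq⟩
    · rw [← hR] at h1; rw [h1]; exact List.findIdx_le_length
    · rw [← hR] at heq; rw [heq]
      have hflt : ps.findIdx (fun w => lowIn w g) < ps.length := by
        rw [List.findIdx_lt_length]
        simpa using hany
      have hp : (fun w => genres.any (fun genre => lowIn w genre))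
          ps[ps.findIdx (fun w => lowIn w g)] = true := by
        simp only [List.any_eq_true]
        exact ⟨g, hg, List.findIdx_getElem (w := hflt)⟩
      exact findIdx_le_of_getElem _ _ _ hflt hp
  have hRK : R ≤ K := by
    by_cases hlt : K < ps.length
    · have hp := List.findIdx_getElem (w := hlt) (p := fun w => genres.any (fun genre => lowIn w genre)) (xs := ps)
      simp only [List.any_eq_true] at hp
      rcases hp with ⟨g, hg, hwg⟩
      have hany : (ps.any (fun w => lowIn w g)) = true := by
        simp only [List.any_eq_true]
        exact ⟨ps[K], List.getElem_mem _, hwg⟩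
      have h1 : ps.findIdx (fun w => lowIn w g) ≤ K :=
        findIdx_le_of_getElem _ _ _ hlt hwg
      exact le_trans (fold_le_f ps genres ps.length g hg hany) h1
    · have : K = ps.length := Nat.le_antisymm List.findIdx_le_length (Nat.le_of_not_lt hlt)
      rw [this]; exact fold_le ps genres ps.length
  omega

theorem branch_eq (genres ps : List String) (dflt : String) :
    loopA genres ps dflt =
      (let best := genres.foldl (fun best genre => scanGenre genre ps 0 best) ps.length
       if best < ps.length then ps.getD best "" else dflt) := by
  rw [loopA_eq genres dflt ps, fold_eq_findIdx ps genres]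

-- ===== VERDICT (by name: the statement is the Claim_ definition above) =====
theorem get_primary_genre_spec : Claim_equal_get_primary_genre := by
  intro genres is_nonfiction _
  unfold Spec_get_primary_genre get_primary_genre get_primary_genre_alt
  cases genres with
  | nil => simp
  | cons g0 rest =>
    cases is_nonfiction with
    | none => simp
    | some b =>
      cases b with
      | true => simpa using branch_eq (g0 :: rest) nonfiction_priority "Nonfiction"
      | false => simpa using branch_eq (g0 :: rest) fiction_priority "Fiction"
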